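-- pv_equiv track=rewrite | github.com/papibe/flipflop-2025 | python/day01/part3.py | solve
-- ===== SOURCE A (Python) =====
-- from typing import List
--
-- def solve(data: List[str]) -> int:
--     total_sum: int = 0
--
--     for banana in data:
--         points = banana.count("ne")
--         if points > 0:
--             continue
--         points += banana.count("ba")
--         points += banana.count("na")
--
--         total_sum += points
--
--     return total_sum
-- ===== SOURCE B (Python) =====
-- from typing import List
--
-- def solve(data: List[str]) -> int:
--     total = 0
--     for s in data:
--         ne = ba = na = 0
--         for x, y in zip(s, s[1:]):
--             if x == 'n' and y == 'e':
--                 ne += 1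
--             elif x == 'b' and y == 'a':
--                 ba += 1
--             elif x == 'n' and y == 'a':
--                 na += 1
--         if ne == 0:
--             total += ba + na
--     return total
-- ===== Notes on version B (the rewrite author's own statement) =====
-- stated objective: alternative
-- what changed: Replaces the three separate str.count substring scans per string with a single pass over each string's adjacent character pairs maintaining three pattern counters.
import Mathlib
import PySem

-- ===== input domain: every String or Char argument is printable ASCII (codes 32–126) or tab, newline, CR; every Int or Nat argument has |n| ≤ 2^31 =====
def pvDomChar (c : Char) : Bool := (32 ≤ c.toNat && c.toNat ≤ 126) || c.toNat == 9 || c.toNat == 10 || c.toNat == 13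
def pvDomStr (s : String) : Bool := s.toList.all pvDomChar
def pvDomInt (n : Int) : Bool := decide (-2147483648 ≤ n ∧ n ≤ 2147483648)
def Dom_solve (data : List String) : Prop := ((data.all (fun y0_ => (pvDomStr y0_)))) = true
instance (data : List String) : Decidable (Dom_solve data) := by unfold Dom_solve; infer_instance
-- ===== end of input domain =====

-- B replaces A's three str.count scans per string with one pass over adjacent pairs; alternative decomposition, not claimed faster.

-- ===== PORT A =====
def solve (data : List String) : Int :=
  data.foldl (fun total_sum banana =>
    let points : Int := (PySem.Str.count banana "ne" : Nat)
    if points > 0 then total_sum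
    else
      let points := points + (PySem.Str.count banana "ba" : Nat)
      let points := points + (PySem.Str.count banana "na" : Nat)
      total_sum + points) 0

-- ===== PORT B =====
-- single pass over adjacent character pairs, three counters
def scan3 : List Char → Nat × Nat × Nat
  | x :: y :: t =>
    let r := scan3 (y :: t)
    if x = 'n' ∧ y = 'e' then (r.1 + 1, r.2.1, r.2.2)
    else if x = 'b' ∧ y = 'a' then (r.1, r.2.1 + 1, r.2.2)
    else if x = 'n' ∧ y = 'a' then (r.1, r.2.1, r.2.2 + 1)
    else r
  | _ => (0, 0, 0)

def solve_alt (data : List String) : Int :=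
  data.foldl (fun total s =>
    let r := scan3 s.toList
    if r.1 = 0 then total + (r.2.1 : Int) + (r.2.2 : Int) else total) 0

-- ===== PRECONDITION & SPEC =====
def Spec_solve (data : List String) (out : Int) : Prop := out = solve_alt data
instance (data : List String) (out : Int) : Decidable (Spec_solve data out) := by unfold Spec_solve; infer_instance

-- ===== CLAIM (what is proved, stated in full; the proofs are below) =====
def Claim_equal_solve : Prop := ∀ (data : List String), Dom_solve data → Spec_solve data (solve data)

-- ===== LEMMAS AND PROOFS =====

-- number of positions i with l[i] = a, l[i+1] = b (proof-side characterisation of both ports)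
def pairCount (a b : Char) : List Char → Nat
  | x :: y :: t => (if x = a ∧ y = b then 1 else 0) + pairCount a b (y :: t)
  | _ => 0

theorem scan3_eq : ∀ (l : List Char),
    scan3 l = (pairCount 'n' 'e' l, pairCount 'b' 'a' l, pairCount 'n' 'a' l)
  | [] => rfl
  | [_] => rfl
  | x :: y :: t => by
    have ih := scan3_eq (y :: t)
    simp only [scan3, pairCount, ih]
    split_ifs <;> simp_all [Nat.add_comm]

theorem pairCount_cons_not_head (a b x : Char) (t : List Char)
    (h : ¬ [a, b].isPrefixOf (x :: t) = true) :
    pairCount a b (x :: t) = pairCount a b t := by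
  match t with
  | [] => rfl
  | y :: t' =>
    simp only [pairCount]
    have : ¬ (x = a ∧ y = b) := by
      intro ⟨hx, hy⟩; subst hx hy
      simp [List.isPrefixOf] at h
    simp [this]

theorem count_go_eq (a b : Char) (hab : a ≠ b) :
    ∀ (fuel : Nat) (l : List Char) (acc : Nat), l.length ≤ fuel →
      PySem.Chars.count.go [a, b] fuel l acc = acc + pairCount a b l
  | 0, l, acc, h => by
    have : l = [] := List.eq_nil_of_length_eq_zero (Nat.le_zero.mp h)
    subst this
    simp [PySem.Chars.count.go, pairCount]
  | fuel + 1, [], acc, h => by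
    simp [PySem.Chars.count.go, pairCount]
  | fuel + 1, x :: t, acc, h => by
    rw [PySem.Chars.count.go]
    by_cases hp : [a, b].isPrefixOf (x :: t) = true
    · match t, hp with
      | [], hp => simp [List.isPrefixOf] at hp
      | y :: t', hp =>
        have hx : a = x ∧ b = y := by
          simpa [List.isPrefixOf] using hp
        obtain ⟨hx, hy⟩ := hx; subst hx hy
        simp only [if_pos hp, List.length_cons] at *
        have hlen : t'.length ≤ fuel := by omega
        rw [show List.drop ([].length + 1 + 1) (a :: b :: t') = t' by simp]
        rw [count_go_eq a b hab fuel t' (acc + 1) hlen]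
        have h2 : pairCount a b (b :: t') = pairCount a b t' := by
          apply pairCount_cons_not_head
          simp [List.isPrefixOf, hab]
        simp [pairCount, h2]
        omega
    · rw [if_neg hp]
      have hlen : t.length ≤ fuel := by simp at h; omega
      rw [count_go_eq a b hab fuel t acc hlen, pairCount_cons_not_head a b x t hp]

theorem count_eq (a b : Char) (hab : a ≠ b) (s : List Char) :
    PySem.Chars.count s [a, b] = pairCount a b s := by
  rw [PySem.Chars.count]
  rw [if_neg (by simp)]
  rw [count_go_eq a b hab s.length s 0 le_rfl]
  omega

theorem str_count_pair (banana : String) (a b : Char) (hab : a ≠ b) :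
    PySem.Str.count banana (String.ofList [a, b]) = pairCount a b banana.toList := by
  rw [PySem.Str.count_eq]
  rw [show (String.ofList [a, b]).toList = [a, b] from String.toList_ofList]
  exact count_eq a b hab banana.toList

theorem step_eq (total : Int) (banana : String) :
    (let points : Int := (PySem.Str.count banana "ne" : Nat)
     if points > 0 then total
     else
       let points := points + (PySem.Str.count banana "ba" : Nat)
       let points := points + (PySem.Str.count banana "na" : Nat)
       total + points)
    = (let r := scan3 banana.toList
       if r.1 = 0 then total + (r.2.1 : Int) + (r.2.2 : Int) else total) := by
  have h1 := str_count_pair banana 'n' 'e' (by decide)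
  have h2 := str_count_pair banana 'b' 'a' (by decide)
  have h3 := str_count_pair banana 'n' 'a' (by decide)
  simp only [show ("ne" : String) = String.ofList ['n', 'e'] from rfl,
    show ("ba" : String) = String.ofList ['b', 'a'] from rfl,
    show ("na" : String) = String.ofList ['n', 'a'] from rfl, h1, h2, h3,
    scan3_eq banana.toList]
  split_ifs <;> omega

theorem fold_eq : ∀ (data : List String) (accA accB : Int), accA = accB →
    data.foldl (fun total_sum banana =>
      let points : Int := (PySem.Str.count banana "ne" : Nat)
      if points > 0 then total_sum
      else
        let points := points + (PySem.Str.count banana "ba" : Nat)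
        let points := points + (PySem.Str.count banana "na" : Nat)
        total_sum + points) accA
    = data.foldl (fun total s =>
        let r := scan3 s.toList
        if r.1 = 0 then total + (r.2.1 : Int) + (r.2.2 : Int) else total) accB
  | [], accA, accB, h => h
  | banana :: rest, accA, accB, h => by
    simp only [List.foldl_cons]
    exact fold_eq rest _ _ (h ▸ step_eq accB banana)

-- ===== VERDICT (by name: the statement is the Claim_ definition above) =====
theorem solve_spec : Claim_equal_solve := by
  intro data _
  unfold Spec_solve solve solve_alt
  exact fold_eq data 0 0 rfl
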